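-- pv_equiv track=rewrite | github.com/ggnnwang/cs61a- | lab04/lab04.py | add_chars
-- ===== SOURCE A (Python) =====
-- def add_chars(w1, w2):
--     """
--     Return a string containing the characters you need to add to w1 to get w2.
--
--     You may assume that w1 is a subsequence of w2.
--
--     >>> add_chars("owl", "howl")
--     'h'
--     >>> add_chars("want", "wanton")   #("coy", "cacophony")# 对齐。 #("fin", "effusion")
--     'on'
--     >>> add_chars("rat", "radiate")
--     'diae'
--     >>> add_chars("a", "prepare")
--     'prepre'
--     >>> add_chars("resin", "recursion")
--     'curo'
--     >>> add_chars("fin", "effusion")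
--     'efuso'
--     >>> add_chars("coy", "cacophony")
--     'acphon'
--     >>> from construct_check import check
--     >>> # ban iteration and sets
--     >>> check(LAB_SOURCE_FILE, 'add_chars',
--     ...       ['For', 'While', 'Set', 'SetComp']) # Must use recursion
--     True
--     """
--     "*** YOUR CODE HERE ***"
--
--
--     if w2 == "":
--         return ""
--
--     digw1 = w1[:1]  #即使digw1是""，也不会出错。保证可以取到第一个字符  better than w1[0]
--     digw2 = w2[:1]
--
--     if digw1 != digw2:
--         return digw2 + add_chars(w1[0:], w2[1:])
--     elif digw1 == digw2:
--         return add_chars(w1[1:], w2[1:])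
-- ===== SOURCE B (Python) =====
-- def add_chars(w1, w2):
--     i = 0
--     res = []
--     for c in w2:
--         if i < len(w1) and w1[i] == c:
--             i += 1
--         else:
--             res.append(c)
--     return ''.join(res)
-- ===== Notes on version B (the rewrite author's own statement) =====
-- stated objective: faster
-- what changed: Replaces the per-character recursion with repeated string slicing by a single iterative pass over w2 that keeps an integer cursor into w1 and appends unmatched characters to a result list.
import Mathlib
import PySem

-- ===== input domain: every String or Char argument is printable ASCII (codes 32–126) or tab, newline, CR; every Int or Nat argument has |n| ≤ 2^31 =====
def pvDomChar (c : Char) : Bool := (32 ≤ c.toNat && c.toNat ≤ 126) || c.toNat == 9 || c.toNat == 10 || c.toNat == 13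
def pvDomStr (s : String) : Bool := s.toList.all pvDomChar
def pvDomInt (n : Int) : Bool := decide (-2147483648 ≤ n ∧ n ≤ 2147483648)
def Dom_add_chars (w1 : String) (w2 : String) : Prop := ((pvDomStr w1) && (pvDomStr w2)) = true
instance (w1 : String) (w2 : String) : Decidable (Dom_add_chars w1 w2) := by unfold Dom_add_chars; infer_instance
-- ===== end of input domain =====

-- B replaces A's per-character recursion with slicing by one iterative pass keeping a cursor into w1 (objective: faster).

-- ===== PORT A =====
-- recursion on w2, carrying the remaining w1; 'w1[:1] != w2[:1]' becomes the take-1 comparison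
def addCharsRec : List Char → List Char → List Char
  | _,  [] => []
  | w1, c :: t =>
    if w1.take 1 ≠ [c] then c :: addCharsRec w1 t
    else addCharsRec (w1.drop 1) t

def add_chars (w1 : String) (w2 : String) : String :=
  String.mk (addCharsRec w1.toList w2.toList)

-- ===== PORT B =====
-- one fold over w2: state (i, res); advance i on a match, else append c to res
def altStep (w1 : List Char) (st : Nat × List Char) (c : Char) : Nat × List Char :=
  if st.1 < w1.length ∧ w1.getD st.1 default = c then (st.1 + 1, st.2)
  else (st.1, st.2 ++ [c])

def add_chars_alt (w1 : String) (w2 : String) : String :=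
  String.mk ((w2.toList.foldl (altStep w1.toList) (0, [])).2)

-- ===== PRECONDITION & SPEC =====
def Spec_add_chars (w1 : String) (w2 : String) (out : String) : Prop := out = add_chars_alt w1 w2
instance (w1 : String) (w2 : String) (out : String) : Decidable (Spec_add_chars w1 w2 out) := by unfold Spec_add_chars; infer_instance

-- ===== CLAIM (what is proved, stated in full; the proofs are below) =====
def Claim_equal_add_chars : Prop := ∀ (w1 : String) (w2 : String), Dom_add_chars w1 w2 → Spec_add_chars w1 w2 (add_chars w1 w2)

-- ===== LEMMAS AND PROOFS =====

-- loop invariant: folding from cursor i yields acc ++ A's result on the remaining suffix of w1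
theorem altStep_invariant (w1 : List Char) :
    ∀ (w2 : List Char) (i : Nat) (acc : List Char), i ≤ w1.length →
      (w2.foldl (altStep w1) (i, acc)).2 = acc ++ addCharsRec (w1.drop i) w2 := by
  intro w2
  induction w2 with
  | nil => intro i acc _; simp [addCharsRec]
  | cons c t ih =>
    intro i acc hi
    by_cases h : i < w1.length ∧ w1.getD i default = c
    · obtain ⟨hlt, heq⟩ := h
      have hdrop : w1.drop i = w1[i] :: w1.drop (i + 1) := List.drop_eq_getElem_cons hlt
      have hc : w1[i] = c := by simpa [List.getD, List.getElem?_eq_getElem hlt] using heq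
      simp only [List.foldl_cons, altStep, if_pos (⟨hlt, heq⟩ : i < w1.length ∧ w1.getD i default = c)]
      rw [ih (i + 1) acc (by omega)]
      rw [hdrop, hc]
      simp [addCharsRec, List.drop_drop]
    · simp only [List.foldl_cons, altStep, if_neg h]
      rw [ih i (acc ++ [c]) hi]
      have hne : (w1.drop i).take 1 ≠ [c] := by
        rcases Nat.lt_or_ge i w1.length with hlt | hge
        · have hdrop : w1.drop i = w1[i] :: w1.drop (i + 1) := List.drop_eq_getElem_cons hlt
          have : w1[i] ≠ c := by
            intro hc
            exact h ⟨hlt, by simp [List.getD, List.getElem?_eq_getElem hlt, hc]⟩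
          rw [hdrop]; simp only [List.take_succ_cons, List.take_zero]
          simp [this]
        · have : w1.drop i = [] := List.drop_eq_nil_of_le hge
          rw [this]; simp
      have : addCharsRec (w1.drop i) (c :: t) = c :: addCharsRec (w1.drop i) t := by
        cases hd : w1.drop i with
        | nil => simp [addCharsRec]
        | cons a s =>
          rw [hd] at hne
          have hac : a ≠ c := by intro h'; exact hne (by simp [h'])
          simp [addCharsRec, hac]
      rw [this]; simp

-- ===== VERDICT (by name: the statement is the Claim_ definition above) =====
theorem add_chars_spec : Claim_equal_add_chars := by
  intro w1 w2 _
  unfold Spec_add_chars add_chars add_chars_alt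
  rw [altStep_invariant w1.toList w2.toList 0 [] (Nat.zero_le _)]
  simp
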